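-- pv_equiv track=rewrite | github.com/nkchangliu/puzzles | leetcode/pick_zero_one.py | count_one_zero
-- ===== SOURCE A (Python) =====
-- def count_one_zero(s):
--     ones = zeros = 0
--     for c in s:
--         if c == "0":
--             zeros += 1
--         else:
--             ones += 1
--     return ones, zeros
-- ===== SOURCE B (Python) =====
-- def count_one_zero(s):
--     if len(s) <= 1:
--         if s == "0":
--             return 0, 1
--         return len(s), 0
--     m = len(s) // 2
--     o1, z1 = count_one_zero(s[:m])
--     o2, z2 = count_one_zero(s[m:])
--     return o1 + o2, z1 + z2
-- ===== Notes on version B (the rewrite author's own statement) =====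
-- stated objective: alternative
-- what changed: Replaces the single left-to-right tallying loop by divide-and-conquer recursion: split the string in half, recurse on each half and add the two (ones, zeros) tallies, with one-character base cases.
import Mathlib
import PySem

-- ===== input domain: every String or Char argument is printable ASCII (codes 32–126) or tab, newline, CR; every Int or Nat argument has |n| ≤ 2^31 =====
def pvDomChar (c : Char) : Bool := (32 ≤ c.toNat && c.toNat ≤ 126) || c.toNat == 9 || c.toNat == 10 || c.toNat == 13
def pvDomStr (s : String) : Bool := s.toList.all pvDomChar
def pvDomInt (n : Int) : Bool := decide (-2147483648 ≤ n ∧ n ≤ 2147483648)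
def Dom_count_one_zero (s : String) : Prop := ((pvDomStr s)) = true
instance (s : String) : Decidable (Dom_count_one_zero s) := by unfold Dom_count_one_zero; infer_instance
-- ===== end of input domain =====

-- B replaces A's single tallying loop by divide-and-conquer recursion: split the
-- string in half, recurse on each half, add the tallies (objective: alternative).

-- ===== PORT A =====
-- loop over the characters, two parallel integer tallies
def count_one_zero (s : String) : Int × Int :=
  s.toList.foldl
    (fun (p : Int × Int) c => if c == '0' then (p.1, p.2 + 1) else (p.1 + 1, p.2))
    (0, 0)

-- ===== PORT B =====
-- divide and conquer on the character list: halve, recurse, add the two tallies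
def pvDC (l : List Char) : Int × Int :=
  if h : l.length ≤ 1 then
    if l = ['0'] then (0, 1) else ((l.length : Int), 0)
  else
    let m := l.length / 2
    let p1 := pvDC (l.take m)
    let p2 := pvDC (l.drop m)
    (p1.1 + p2.1, p1.2 + p2.2)
termination_by l.length
decreasing_by
  · simp only [List.length_take]; omega
  · simp only [List.length_drop]; omega

def count_one_zero_alt (s : String) : Int × Int := pvDC s.toList

-- ===== PRECONDITION & SPEC =====
def Spec_count_one_zero (s : String) (out : Int × Int) : Prop := out = count_one_zero_alt s
instance (s : String) (out : Int × Int) : Decidable (Spec_count_one_zero s out) := by unfold Spec_count_one_zero; infer_instance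

-- ===== CLAIM =====
def Claim_equal_count_one_zero : Prop := ∀ (s : String), Dom_count_one_zero s → Spec_count_one_zero s (count_one_zero s)

-- ===== LEMMAS AND PROOFS =====

-- A's loop computes (a + #non-zeros, b + #zeros) from accumulator (a, b)
theorem pv_foldl_tally (l : List Char) (a b : Int) :
    l.foldl (fun (p : Int × Int) c => if c == '0' then (p.1, p.2 + 1) else (p.1 + 1, p.2)) (a, b)
      = (a + (l.countP (fun c => !(c == '0')) : Int), b + (l.count '0' : Int)) := by
  induction l generalizing a b with
  | nil => simp
  | cons h t ih =>
    simp only [List.foldl_cons]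
    by_cases hc : h = '0'
    · rw [if_pos (by simp [hc]), ih]
      simp only [List.count_cons, List.countP_cons, hc, beq_self_eq_true, Bool.not_true,
        decide_true, if_true, cond_true, Prod.mk.injEq]
      constructor <;> push_cast <;> omega
    · rw [if_neg (by simp [hc]), ih]
      simp only [List.count_cons, List.countP_cons, Prod.mk.injEq]
      have hb : (h == '0') = false := by simp [hc]
      simp only [hb, Bool.not_false, if_false, cond_false, cond_true]
      constructor <;> push_cast <;> omega

-- B's divide-and-conquer computes (#non-zeros, #zeros): strong induction on length
theorem pv_dc_eq_aux : ∀ (n : Nat) (l : List Char), l.length ≤ n →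
    pvDC l = ((l.countP (fun c => !(c == '0')) : Int), (l.count '0' : Int)) := by
  intro n
  induction n with
  | zero =>
    intro l hl
    have : l = [] := List.length_eq_zero_iff.mp (Nat.le_zero.mp hl)
    subst this
    rw [pvDC]
    simp
  | succ n ih =>
    intro l hl
    by_cases h : l.length ≤ 1
    · rw [pvDC, dif_pos h]
      interval_cases hn : l.length
      · have : l = [] := List.length_eq_zero_iff.mp hn
        simp [this]
      · obtain ⟨c, hc⟩ : ∃ c, l = [c] := List.length_eq_one_iff.mp hn
        subst hc
        by_cases h0 : c = '0'
        · simp [h0]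
        · rw [if_neg (by simp [h0])]
          simp [List.count_singleton, h0]
    · rw [pvDC, dif_neg h]
      have h1 : (l.take (l.length / 2)).length ≤ n := by
        simp only [List.length_take]; omega
      have h2 : (l.drop (l.length / 2)).length ≤ n := by
        simp only [List.length_drop]; omega
      have hc1 : ((l.take (l.length / 2)).countP (fun c => !(c == '0')) : Int)
            + ((l.drop (l.length / 2)).countP (fun c => !(c == '0')) : Int)
          = (l.countP (fun c => !(c == '0')) : Int) := by
        conv_rhs => rw [← List.take_append_drop (l.length / 2) l]
        rw [List.countP_append]; push_cast; ring
      have hc2 : ((l.take (l.length / 2)).count '0' : Int)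
            + ((l.drop (l.length / 2)).count '0' : Int) = (l.count '0' : Int) := by
        conv_rhs => rw [← List.take_append_drop (l.length / 2) l]
        rw [List.count_append]; push_cast; ring
      simp only [ih _ h1, ih _ h2, Prod.mk.injEq]
      exact ⟨hc1, hc2⟩

theorem pv_dc_eq (l : List Char) :
    pvDC l = ((l.countP (fun c => !(c == '0')) : Int), (l.count '0' : Int)) :=
  pv_dc_eq_aux l.length l le_rfl

-- ===== VERDICT =====
theorem count_one_zero_spec : Claim_equal_count_one_zero := by
  intro s _
  unfold Spec_count_one_zero count_one_zero count_one_zero_alt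
  rw [pv_foldl_tally, pv_dc_eq]
  simp
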